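-- pv_equiv track=rewrite | github.com/Tamimi2022/Exercise-Python | for/main.py | alphabet_set
-- ===== SOURCE A (Python) =====
-- def alphabet_set(countries):
--     combined_alphabet = []
--     alphabet = ['a', 'b', 'c', 'd', 'e', 'f', 'g', 'h', 'i', 'j', 'k', 'l', 'm', 'n', 'o', 'p', 'q', 'r', 's', 't', 'u', 'v', 'w', 'x', 'y', 'z']
--     for country in countries:
--         for char in country.lower():
--             if char.isalpha() and char in alphabet:
--                 alphabet.remove(char)
--                 if country in combined_alphabet:
--                     continue
--                 else:
--                     combined_alphabet.append(country)
--             continue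
--         continue
--     return combined_alphabet
-- ===== SOURCE B (Python) =====
-- def alphabet_set(countries):
--     first_owner = {}
--     for i, country in enumerate(countries):
--         for char in country.lower():
--             if char.isalpha() and 'a' <= char <= 'z' and char not in first_owner:
--                 first_owner[char] = i
--     owners = set(first_owner.values())
--     return [country for i, country in enumerate(countries) if i in owners]
-- ===== Notes on version B (the rewrite author's own statement) =====
-- stated objective: faster
-- what changed: Replaces A's shrinking-alphabet list with remove() and membership-dedup appends by a two-pass scheme: build a first-owner index table (letter -> index of first country containing it) with O(1) dict lookups, then emit the countries whose index owns some letter.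
import Mathlib
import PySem

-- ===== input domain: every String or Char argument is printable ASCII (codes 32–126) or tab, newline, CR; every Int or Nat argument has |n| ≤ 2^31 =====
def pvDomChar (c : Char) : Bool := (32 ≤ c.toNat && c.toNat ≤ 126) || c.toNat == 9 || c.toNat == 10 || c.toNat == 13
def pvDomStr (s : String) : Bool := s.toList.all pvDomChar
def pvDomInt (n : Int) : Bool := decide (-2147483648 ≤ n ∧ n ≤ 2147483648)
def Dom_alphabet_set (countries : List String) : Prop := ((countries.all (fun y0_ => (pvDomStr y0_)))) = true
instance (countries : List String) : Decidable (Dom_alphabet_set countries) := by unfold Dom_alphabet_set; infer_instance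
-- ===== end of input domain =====

-- B replaces A's shrinking-alphabet mutate-and-append loop by a first-owner index table plus a
-- filtered emit pass (alternative decomposition; return values proved equal on the whole domain).

-- ===== PORT A =====
def alphaL : List Char := ['a','b','c','d','e','f','g','h','i','j','k','l','m','n','o','p','q','r','s','t','u','v','w','x','y','z']

-- inner 'for char in country.lower()' body: remove the char from the remaining alphabet and
-- append the country to combined_alphabet unless it is already there
def aInner (country : String) (st : List String × List Char) (char : Char) : List String × List Char :=
  if PySem.Chars.isalpha char && st.2.contains char then
    ((if st.1.contains country then st.1 else st.1 ++ [country]),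
     (PySem.List.remove? st.2 char).getD st.2)
  else st

def aOuter (st : List String × List Char) (country : String) : List String × List Char :=
  (PySem.Str.lower country).toList.foldl (aInner country) st

def alphabet_set (countries : List String) : List String :=
  (countries.foldl aOuter ([], alphaL)).1

-- ===== PORT B =====
-- first pass body: record the first owner index of every previously-unseen a–z letter
def bInner (i : Int) (d : PySem.Dict Char Int) (char : Char) : PySem.Dict Char Int :=
  if PySem.Chars.isalpha char && decide ('a' ≤ char) && decide (char ≤ 'z') && !(d.contains char)
  then d.insert char i else d

def bOuter (d : PySem.Dict Char Int) (p : Int × String) : PySem.Dict Char Int :=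
  (PySem.Str.lower p.2).toList.foldl (bInner p.1) d

def alphabet_set_alt (countries : List String) : List String :=
  let first_owner := (PySem.List.enumerate countries).foldl bOuter PySem.Dict.empty
  let owners : PySem.Set Int := PySem.Set.ofList first_owner.values
  ((PySem.List.enumerate countries).filter (fun p => PySem.Set.contains owners p.1)).map (fun p => p.2)

-- ===== PRECONDITION & SPEC =====
def Spec_alphabet_set (countries : List String) (out : List String) : Prop := out = alphabet_set_alt countries
instance (countries : List String) (out : List String) : Decidable (Spec_alphabet_set countries out) := by unfold Spec_alphabet_set; infer_instance

-- ===== CLAIM (what is proved, stated in full; the proofs are below) =====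
def Claim_equal_alphabet_set : Prop := ∀ (countries : List String), Dom_alphabet_set countries → Spec_alphabet_set countries (alphabet_set countries)

-- ===== LEMMAS AND PROOFS =====
def low (c : String) : List Char := (PySem.Str.lower c).toList

def okB (x : Char) : Bool := PySem.Chars.isalpha x && decide ('a' ≤ x) && decide (x ≤ 'z')

-- country at index p.1 contributes a letter unseen in the earlier countries
def keepB (l : List String) (p : Int × String) : Bool :=
  (low p.2).any (fun x => okB x && !((l.take p.1.toNat).flatMap low).contains x)

-- the common reference value both ports are proved equal to
def combRef (l : List String) : List String :=
  ((PySem.List.enumerate l).filter (fun p => keepB l p)).map (fun p => p.2)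

lemma mem_alphaL_iff (x : Char) : x ∈ alphaL ↔ okB x = true := by
  constructor
  · intro h
    have hall : alphaL.all okB = true := by decide
    exact List.all_eq_true.mp hall _ h
  · intro h
    simp only [okB, Bool.and_eq_true, decide_eq_true_eq] at h
    obtain ⟨⟨-, h1⟩, h2⟩ := h
    have h1' : 97 ≤ x.toNat := h1
    have h2' : x.toNat ≤ 122 := h2
    have hc : x = Char.ofNat x.toNat := (Char.ofNat_toNat x).symm
    interval_cases h : x.toNat <;> rw [hc] <;> decide

lemma innerA (cs : List Char) (country : String) (comb : List String) (alph : List Char)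
    (hsub : ∀ x ∈ alph, x ∈ alphaL) (hnd : alph.Nodup) :
    cs.foldl (aInner country) (comb, alph) =
      ((if (∃ x ∈ cs, x ∈ alph) ∧ country ∉ comb then comb ++ [country] else comb),
       alph.filter (fun x => decide (x ∉ cs))) := by
  induction cs generalizing comb alph with
  | nil => simp
  | cons c0 cs ih =>
    rw [List.foldl_cons]
    by_cases hc : c0 ∈ alph
    · have halpha : PySem.Chars.isalpha c0 = true := by
        have h := (mem_alphaL_iff c0).mp (hsub _ hc)
        simp only [okB, Bool.and_eq_true] at h
        exact h.1.1
      have hrem : (PySem.List.remove? alph c0).getD alph = alph.erase c0 := by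
        rw [PySem.List.remove?_eq_some_erase alph c0 hc]; rfl
      have hsub' : ∀ x ∈ alph.erase c0, x ∈ alphaL := fun x hx => hsub x (List.mem_of_mem_erase hx)
      have hnd' : (alph.erase c0).Nodup := hnd.erase c0
      have herase : alph.erase c0 = alph.filter (fun x => x != c0) := hnd.erase_eq_filter c0
      have hfilt : (alph.erase c0).filter (fun x => decide (x ∉ cs))
          = alph.filter (fun x => decide (x ∉ c0 :: cs)) := by
        rw [herase, List.filter_filter]
        apply List.filter_congr
        intro x _
        by_cases h1 : x ∈ cs <;> by_cases h2 : x = c0 <;> simp [h1, h2]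
      have hstep : aInner country (comb, alph) c0
          = ((if country ∈ comb then comb else comb ++ [country]), alph.erase c0) := by
        simp [aInner, halpha, hc, hrem, List.contains_eq_mem]
      rw [hstep]
      have hexc : ∃ x ∈ c0 :: cs, x ∈ alph := ⟨c0, List.mem_cons_self, hc⟩
      by_cases hcomb : country ∈ comb
      · have hn1 : ¬((∃ x ∈ cs, x ∈ alph.erase c0) ∧ country ∉ comb) := fun h => h.2 hcomb
        have hn2 : ¬((∃ x ∈ c0 :: cs, x ∈ alph) ∧ country ∉ comb) := fun h => h.2 hcomb
        rw [if_pos hcomb, ih _ _ hsub' hnd', hfilt, if_neg hn1, if_neg hn2]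
      · have hn1 : ¬((∃ x ∈ cs, x ∈ alph.erase c0) ∧ country ∉ comb ++ [country]) :=
          fun h => h.2 (List.mem_append_right _ (List.mem_singleton_self country))
        rw [if_neg hcomb, ih _ _ hsub' hnd', hfilt, if_neg hn1, if_pos ⟨hexc, hcomb⟩]
    · have hstep : aInner country (comb, alph) c0 = (comb, alph) := by
        simp [aInner, List.contains_eq_mem, hc]
      rw [hstep, ih _ _ hsub hnd]
      have hfilt : alph.filter (fun x => decide (x ∉ cs))
          = alph.filter (fun x => decide (x ∉ c0 :: cs)) := by
        apply List.filter_congr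
        intro x hx
        have hxc : x ≠ c0 := fun h => hc (h ▸ hx)
        by_cases h1 : x ∈ cs <;> simp [h1, hxc]
      have hex : (∃ x ∈ cs, x ∈ alph) ↔ (∃ x ∈ c0 :: cs, x ∈ alph) := by
        constructor
        · rintro ⟨x, hx1, hx2⟩; exact ⟨x, List.mem_cons_of_mem _ hx1, hx2⟩
        · rintro ⟨x, hx1, hx2⟩
          rcases List.mem_cons.mp hx1 with h | h
          · exact absurd (h ▸ hx2) hc
          · exact ⟨x, h, hx2⟩
      rw [hfilt]
      by_cases hco : (∃ x ∈ c0 :: cs, x ∈ alph) ∧ country ∉ comb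
      · rw [if_pos hco, if_pos ⟨hex.mpr hco.1, hco.2⟩]
      · rw [if_neg hco, if_neg (fun (h : (∃ x ∈ cs, x ∈ alph) ∧ country ∉ comb) => hco ⟨hex.mp h.1, h.2⟩)]

lemma combRef_subset (l : List String) (c : String) (h : c ∈ combRef l) : c ∈ l := by
  unfold combRef at h
  obtain ⟨p, hp, hpc⟩ := List.mem_map.mp h
  have hp2 := List.mem_of_mem_filter hp
  obtain ⟨k, hk, rfl⟩ := (PySem.List.mem_enumerate_iff l 0 p).mp hp2
  subst hpc
  exact List.getElem_mem hk

lemma anyP_iff (c : String) (pre : List Char) :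
    (low c).any (fun x => okB x && !pre.contains x) = true
      ↔ ∃ x ∈ low c, okB x = true ∧ x ∉ pre := by
  simp [List.any_eq_true, List.contains_eq_mem]

lemma combRef_append (l : List String) (c : String) :
    combRef (l ++ [c]) = combRef l ++
      (if (low c).any (fun x => okB x && !((l.flatMap low).contains x)) then [c] else []) := by
  unfold combRef
  rw [PySem.List.enumerate_append, List.filter_append, List.map_append]
  congr 1
  · apply congrArg
    apply List.filter_congr
    intro p hp
    obtain ⟨k, hk, rfl⟩ := (PySem.List.mem_enumerate_iff l 0 p).mp hp
    unfold keepB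
    have ht : ((0 : Int) + (k : Int)).toNat = k := by omega
    rw [ht, List.take_append_of_le_length (le_of_lt hk)]
  · have henum : PySem.List.enumerate [c] ((0 : Int) + (l.length : Int))
        = [((0 : Int) + (l.length : Int), c)] := rfl
    have ht : ((0 : Int) + (l.length : Int)).toNat = l.length := by omega
    have hkb : keepB (l ++ [c]) ((0 : Int) + (l.length : Int), c)
        = (low c).any (fun x => okB x && !((l.flatMap low).contains x)) := by
      unfold keepB
      rw [ht, List.take_left]
    rw [henum, List.filter_cons, hkb]
    cases h : (low c).any (fun x => okB x && !((l.flatMap low).contains x)) <;> simp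

lemma A_fold (l : List String) :
    l.foldl aOuter ([], alphaL) =
      (combRef l, alphaL.filter (fun x => decide (x ∉ l.flatMap low))) := by
  induction l using List.reverseRecOn with
  | nil => simp [combRef]
  | append_singleton l c ihl =>
    rw [List.foldl_append, List.foldl_cons, List.foldl_nil, ihl]
    have hsub : ∀ x ∈ alphaL.filter (fun x => decide (x ∉ l.flatMap low)), x ∈ alphaL :=
      fun x hx => List.mem_of_mem_filter hx
    have hnd : (alphaL.filter (fun x => decide (x ∉ l.flatMap low))).Nodup :=
      List.Nodup.filter _ (by decide)
    show (PySem.Str.lower c).toList.foldl (aInner c) _ = _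
    rw [innerA _ c _ _ hsub hnd]
    have hfm : (l ++ [c]).flatMap low = l.flatMap low ++ low c := by
      rw [List.flatMap_append]; simp
    refine Prod.ext ?_ ?_ <;> dsimp only
    · rw [combRef_append]
      have hiff : (∃ x ∈ (PySem.Str.lower c).toList,
            x ∈ alphaL.filter (fun x => decide (x ∉ l.flatMap low)))
          ↔ ∃ x ∈ low c, okB x = true ∧ x ∉ l.flatMap low := by
        unfold low
        constructor
        · rintro ⟨x, hx1, hx2⟩
          obtain ⟨hxa, hxn⟩ := List.mem_filter.mp hx2
          exact ⟨x, hx1, (mem_alphaL_iff x).mp hxa, by simpa using hxn⟩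
        · rintro ⟨x, hx1, hx2, hx3⟩
          exact ⟨x, hx1, List.mem_filter.mpr ⟨(mem_alphaL_iff x).mpr hx2, by simpa using hx3⟩⟩
      by_cases hP : ∃ x ∈ low c, okB x = true ∧ x ∉ l.flatMap low
      · have hnc : c ∉ combRef l := by
          intro hcc
          obtain ⟨x, hx1, -, hx3⟩ := hP
          exact hx3 (List.mem_flatMap.mpr ⟨c, combRef_subset l c hcc, hx1⟩)
        rw [if_pos ⟨hiff.mpr hP, hnc⟩, if_pos ((anyP_iff c _).mpr hP)]
      · have hn1 : ¬((∃ x ∈ (PySem.Str.lower c).toList,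
              x ∈ alphaL.filter (fun x => decide (x ∉ l.flatMap low))) ∧ c ∉ combRef l) :=
          fun h => hP (hiff.mp h.1)
        have hn2 : ¬((low c).any (fun x => okB x && !((l.flatMap low).contains x)) = true) :=
          fun h => hP ((anyP_iff c _).mp h)
        rw [if_neg hn1, if_neg hn2]
        simp
    · rw [List.filter_filter]
      apply List.filter_congr
      intro x hx
      rw [hfm]
      by_cases h1 : x ∈ l.flatMap low <;> by_cases h2 : x ∈ low c <;>
        simp [h1, low, List.mem_append]

lemma innerB_cont (cs : List Char) (i : Int) (d : PySem.Dict Char Int) (x : Char) :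
    (cs.foldl (bInner i) d).contains x = (d.contains x || (okB x && cs.contains x)) := by
  induction cs generalizing d with
  | nil => simp
  | cons y cs ih =>
    rw [List.foldl_cons]
    by_cases hy : (PySem.Chars.isalpha y && decide ('a' ≤ y) && decide (y ≤ 'z') && !d.contains y) = true
    · have hoky : okB y = true := by
        simp only [Bool.and_eq_true] at hy
        simp [okB, hy.1.1.1, hy.1.1.2, hy.1.2]
      have hdy : d.contains y = false := by
        simp only [Bool.and_eq_true, Bool.not_eq_eq_eq_not, Bool.not_true] at hy
        exact hy.2
      rw [show bInner i d y = d.insert y i from by unfold bInner; rw [if_pos hy], ih]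
      rw [PySem.Dict.contains_insert]
      by_cases hxy : x = y
      · subst hxy
        simp [hoky, hdy]
      · have : (x == y) = false := by simp [hxy]
        simp [this, hxy, List.contains_eq_mem]
    · rw [show bInner i d y = d from by unfold bInner; rw [if_neg hy], ih]
      by_cases hxy : x = y
      · subst hxy
        rcases Bool.not_eq_true _ |>.mp hy with _
        have h2 : (okB x && !d.contains x) = false := by
          cases hok : okB x
          · rfl
          · cases hdx : d.contains x
            · exfalso
              apply hy
              simp only [okB, Bool.and_eq_true] at hok
              simp [hok.1.1, hok.1.2, hok.2, hdx]
            · rfl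
        cases hdx : d.contains x
        · cases hok : okB x
          · simp
          · have := h2; rw [hok, hdx] at this; simp at this
        · simp
      · have hb : (x == y) = false := by simp [hxy]
        simp [List.contains_eq_mem, hxy]

lemma innerB_val (cs : List Char) (i : Int) (d : PySem.Dict Char Int) (j : Int) :
    j ∈ (cs.foldl (bInner i) d).values ↔
      j ∈ d.values ∨ (j = i ∧ ∃ x ∈ cs, okB x = true ∧ d.contains x = false) := by
  induction cs generalizing d with
  | nil => simp
  | cons y cs ih =>
    rw [List.foldl_cons]
    by_cases hy : (PySem.Chars.isalpha y && decide ('a' ≤ y) && decide (y ≤ 'z') && !d.contains y) = true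
    · have hoky : okB y = true := by
        simp only [Bool.and_eq_true] at hy
        simp [okB, hy.1.1.1, hy.1.1.2, hy.1.2]
      have hdy : d.contains y = false := by
        simp only [Bool.and_eq_true, Bool.not_eq_eq_eq_not, Bool.not_true] at hy
        exact hy.2
      have hvals : (d.insert y i).values = d.values ++ [i] := by
        show ((d.insert y i).items.map Prod.snd) = _
        rw [PySem.Dict.items_insert_of_not_contains d i hdy]
        simp [PySem.Dict.values]
      rw [show bInner i d y = d.insert y i from by unfold bInner; rw [if_pos hy], ih, hvals]
      constructor
      · rintro (h | ⟨rfl, x, hx, hok, hcon⟩)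
        · rcases List.mem_append.mp h with h | h
          · exact Or.inl h
          · exact Or.inr ⟨List.mem_singleton.mp h, y, List.mem_cons_self, hoky, hdy⟩
        · rw [PySem.Dict.contains_insert] at hcon
          have hxy : (x == y) = false := by
            cases hxy : x == y
            · rfl
            · rw [hxy] at hcon; simp at hcon
          have hdx : d.contains x = false := by
            rw [hxy] at hcon; simpa using hcon
          exact Or.inr ⟨rfl, x, List.mem_cons_of_mem _ hx, hok, hdx⟩
      · rintro (h | ⟨rfl, x, hx, hok, hcon⟩)
        · exact Or.inl (List.mem_append_left _ h)
        · rcases List.mem_cons.mp hx with rfl | hx'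
          · exact Or.inl (List.mem_append_right _ (by simp))
          · by_cases hxy : x = y
            · subst hxy
              exact Or.inl (List.mem_append_right _ (by simp))
            · refine Or.inr ⟨rfl, x, hx', hok, ?_⟩
              rw [PySem.Dict.contains_insert]
              simp [hxy, hcon]
    · rw [show bInner i d y = d from by unfold bInner; rw [if_neg hy], ih]
      constructor
      · rintro (h | ⟨rfl, x, hx, hok, hcon⟩)
        · exact Or.inl h
        · exact Or.inr ⟨rfl, x, List.mem_cons_of_mem _ hx, hok, hcon⟩
      · rintro (h | ⟨rfl, x, hx, hok, hcon⟩)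
        · exact Or.inl h
        · rcases List.mem_cons.mp hx with rfl | hx'
          · exfalso
            apply hy
            simp only [okB, Bool.and_eq_true] at hok
            simp [hok.1.1, hok.1.2, hok.2, hcon]
          · exact Or.inr ⟨rfl, x, hx', hok, hcon⟩

lemma B_val (l : List String) (s : Int) (d : PySem.Dict Char Int) (j : Int) :
    j ∈ ((PySem.List.enumerate l s).foldl bOuter d).values ↔
      j ∈ d.values ∨ ∃ (k : Nat) (_ : k < l.length), j = s + k ∧
        ∃ x ∈ low l[k], okB x = true ∧ x ∉ (l.take k).flatMap low ∧ d.contains x = false := by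
  induction l generalizing s d with
  | nil => simp [PySem.List.enumerate]
  | cons c t ih =>
    rw [PySem.List.enumerate_cons, List.foldl_cons, ih]
    have hv : ∀ j', j' ∈ (bOuter d (s, c)).values ↔
        j' ∈ d.values ∨ (j' = s ∧ ∃ x ∈ low c, okB x = true ∧ d.contains x = false) := by
      intro j'
      unfold bOuter low
      exact innerB_val _ _ _ _
    have hcnt : ∀ x : Char, (bOuter d (s, c)).contains x
        = (d.contains x || (okB x && ((PySem.Str.lower c).toList).contains x)) := by
      intro x
      unfold bOuter
      exact innerB_cont _ _ _ _
    constructor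
    · rintro (h1 | ⟨k, hk, rfl, x, hx, hok, hpre, hcon⟩)
      · rcases (hv j).mp h1 with h2 | ⟨rfl, x, hx, hok, hcon⟩
        · exact Or.inl h2
        · exact Or.inr ⟨0, by simp, by simp, x, hx, hok, by simp, hcon⟩
      · rw [hcnt x] at hcon
        have hdx : d.contains x = false := by
          cases hdx : d.contains x
          · rfl
          · rw [hdx] at hcon; simp at hcon
        have hxc : x ∉ low c := by
          intro hxc
          rw [hdx, hok] at hcon
          simp only [Bool.false_or, Bool.true_and, List.contains_eq_mem,
            decide_eq_false_iff_not] at hcon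
          exact hcon hxc
        refine Or.inr ⟨k + 1, by simpa using hk, by push_cast; ring, x, by simpa using hx, hok, ?_, hdx⟩
        rw [List.take_succ_cons, List.flatMap_cons, List.mem_append]
        rintro (h | h)
        · exact hxc h
        · exact hpre h
    · rintro (h1 | ⟨k, hk, hj, x, hx, hok, hpre, hcon⟩)
      · exact Or.inl ((hv j).mpr (Or.inl h1))
      · match k, hk, hj, hx, hpre with
        | 0, hk, hj, hx, hpre =>
          refine Or.inl ((hv j).mpr (Or.inr ⟨by simpa using hj, x, by simpa using hx, hok, hcon⟩))
        | (k+1), hk, hj, hx, hpre =>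
          rw [List.take_succ_cons, List.flatMap_cons, List.mem_append] at hpre
          have hxc : x ∉ low c := fun h => hpre (Or.inl h)
          have hpre' : x ∉ (t.take k).flatMap low := fun h => hpre (Or.inr h)
          have hcon' : (bOuter d (s, c)).contains x = false := by
            rw [hcnt x, hcon, hok]
            simp only [Bool.false_or, Bool.true_and, List.contains_eq_mem,
              decide_eq_false_iff_not]
            exact hxc
          exact Or.inr ⟨k, by simpa using hk, by push_cast at hj ⊢; linarith, x, by simpa using hx, hok, hpre', hcon'⟩

lemma A_eq (l : List String) : alphabet_set l = combRef l := by
  simp [alphabet_set, A_fold]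

lemma B_eq (l : List String) : alphabet_set_alt l = combRef l := by
  rw [show alphabet_set_alt l = ((PySem.List.enumerate l).filter (fun p =>
      PySem.Set.contains (PySem.Set.ofList
        (((PySem.List.enumerate l).foldl bOuter PySem.Dict.empty)).values) p.1)).map
        (fun p => p.2) from rfl]
  unfold combRef
  congr 1
  apply List.filter_congr
  intro p hp
  obtain ⟨k, hk, rfl⟩ := (PySem.List.mem_enumerate_iff l 0 p).mp hp
  apply Bool.eq_iff_iff.mpr
  have hmem : ((0 : Int) + (k : Int)
        ∈ ((PySem.List.enumerate l).foldl bOuter PySem.Dict.empty).values) ↔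
      ∃ x ∈ low l[k], okB x = true ∧ x ∉ (l.take k).flatMap low := by
    rw [B_val l 0 PySem.Dict.empty _]
    constructor
    · rintro (h | ⟨k', hk', hj, x, hx, hok, hpre, -⟩)
      · exact absurd h (by
          rw [show (PySem.Dict.empty : PySem.Dict Char Int).values = [] from rfl]
          simp)
      · have hkk : k' = k := by omega
        subst hkk
        exact ⟨x, hx, hok, hpre⟩
    · rintro ⟨x, hx, hok, hpre⟩
      exact Or.inr ⟨k, hk, rfl, x, hx, hok, hpre, rfl⟩
  constructor
  · intro h
    simp only [PySem.Set.contains, List.contains_eq_mem, decide_eq_true_eq] at h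
    have h1 : (0 : Int) + (k : Int)
        ∈ ((PySem.List.enumerate l).foldl bOuter PySem.Dict.empty).values :=
      (PySem.Set.mem_ofList _ _).mp (by simpa using h)
    obtain ⟨x, hx, hok, hpre⟩ := hmem.mp h1
    unfold keepB
    rw [show ((0 : Int) + (k : Int)).toNat = k from by omega]
    exact (anyP_iff _ _).mpr ⟨x, hx, hok, hpre⟩
  · intro h
    have h1 : keepB l ((0 : Int) + (k : Int), l[k]) = true := h
    unfold keepB at h1
    rw [show ((0 : Int) + (k : Int)).toNat = k from by omega] at h1
    have h2 := hmem.mpr ((anyP_iff _ _).mp h1)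
    simp only [PySem.Set.contains, List.contains_eq_mem, decide_eq_true_eq]
    exact (PySem.Set.mem_ofList _ _).mpr h2

-- ===== VERDICT (by name: the statement is the Claim_ definition above) =====
theorem alphabet_set_spec : Claim_equal_alphabet_set := by
  intro countries _
  unfold Spec_alphabet_set
  rw [A_eq, B_eq]
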